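-- pv_equiv track=rewrite | github.com/PJDRUM/FantasyDownload | scripts/consensus_scrape.py | choose_value_column
-- ===== SOURCE A (Python) =====
-- def find_column(columns: list[str], *needles: str) -> str:
--     lowered = {col: col.lower() for col in columns}
--     for col, low in lowered.items():
--         if all(needle.lower() in low for needle in needles):
--             return col
--     raise KeyError(f"Could not find column containing: {needles!r}. Saw: {columns!r}")
--
-- def choose_value_column(columns: list[str]) -> str:
--     for option in (
--         ("rk",),
--         ("rank",),
--         ("ecr",),
--         ("overall", "rank"),
--     ):
--         try:
--             return find_column(columns, *option)
--         except KeyError: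
--             continue
--     raise KeyError(f"Could not find consensus rank column. Saw: {columns!r}")
-- ===== SOURCE B (Python) =====
-- def choose_value_column(columns: list[str]) -> str:
--     options = (("rk",), ("rank",), ("ecr",), ("overall", "rank"))
--     best = None  # (option_index, column) with the smallest option_index, earliest column
--     for col in columns:
--         low = col.lower()
--         for i, needles in enumerate(options):
--             if all(n in low for n in needles):
--                 if best is None or i < best[0]:
--                     best = (i, col)
--                 break
--     if best is None:
--         raise KeyError(f"Could not find consensus rank column. Saw: {columns!r}")
--     return best[1]
-- ===== Notes on version B (the rewrite author's own statement) =====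
-- stated objective: alternative
-- what changed: Replaces the outer loop over option tuples (each rescanning all columns via a rebuilt lowered dict and try/except) with a single pass over the columns that lowercases each column once, computes its smallest matching option index, and keeps the lexicographically best (option_index, column) candidate.
import Mathlib
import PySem

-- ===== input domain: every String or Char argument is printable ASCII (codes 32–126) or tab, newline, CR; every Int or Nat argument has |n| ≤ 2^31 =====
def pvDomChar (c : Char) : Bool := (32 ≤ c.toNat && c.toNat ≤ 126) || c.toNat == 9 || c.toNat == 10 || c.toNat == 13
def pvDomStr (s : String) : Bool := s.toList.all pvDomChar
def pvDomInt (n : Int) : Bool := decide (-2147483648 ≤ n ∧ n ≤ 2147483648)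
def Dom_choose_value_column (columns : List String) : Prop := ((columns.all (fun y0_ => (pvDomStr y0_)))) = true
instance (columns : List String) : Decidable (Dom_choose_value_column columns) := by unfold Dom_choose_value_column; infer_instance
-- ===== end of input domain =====

-- B replaces A's outer loop over option tuples (each rescanning all columns) by one pass over the
-- columns keeping the best (option_index, column) candidate; equivalence proved on Pre_ (some column matches).

-- ===== PORT A =====
-- find_column: builds the lowered dict, scans its items, first match; none = KeyError
def pvFindColumn (columns : List String) (needles : List String) : Option String :=
  ((columns.foldl (fun d c => d.insert c (PySem.Str.lower c)) (PySem.Dict.empty)).items.find?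
    (fun p => needles.all (fun n => PySem.Str.isIn (PySem.Str.lower n) p.2))).map (fun p => p.1)

-- try/except chain over the four option tuples; the final KeyError is outside Pre_ (returns "")
def choose_value_column (columns : List String) : String :=
  match pvFindColumn columns ["rk"] with
  | some c => c
  | none =>
    match pvFindColumn columns ["rank"] with
    | some c => c
    | none =>
      match pvFindColumn columns ["ecr"] with
      | some c => c
      | none =>
        match pvFindColumn columns ["overall", "rank"] with
        | some c => c
        | none => ""

-- ===== PORT B =====
def pvOptions : List (List String) := [["rk"], ["rank"], ["ecr"], ["overall", "rank"]]

-- inner loop: smallest option index whose needles are all in the lowered column ('break')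
def pvOptIdx (low : String) : Option Int :=
  ((PySem.List.enumerate pvOptions).find? (fun p => p.2.all (fun n => PySem.Str.isIn n low))).map (fun p => p.1)

-- loop body: keep the candidate with the strictly smaller option index (earlier column wins ties)
def pvStep (best : Option (Int × String)) (col : String) : Option (Int × String) :=
  match pvOptIdx (PySem.Str.lower col) with
  | none => best
  | some i =>
    match best with
    | none => some (i, col)
    | some (bi, bc) => if i < bi then some (i, col) else some (bi, bc)

def choose_value_column_alt (columns : List String) : String :=
  match columns.foldl pvStep none with
  | some (_, c) => c
  | none => ""

-- ===== PRECONDITION & SPEC =====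
-- Pre_ excludes exactly the inputs where no column matches any option tuple: there the Python A
-- (and the Python B) raises KeyError and returns no value.
def Pre_choose_value_column (columns : List String) : Prop :=
  (columns.any (fun c =>
    let low := PySem.Str.lower c
    PySem.Str.isIn "rk" low || PySem.Str.isIn "rank" low || PySem.Str.isIn "ecr" low ||
      (PySem.Str.isIn "overall" low && PySem.Str.isIn "rank" low))) = true
instance (columns : List String) : Decidable (Pre_choose_value_column columns) := by
  unfold Pre_choose_value_column; infer_instance

def pvWitness_choose_value_column : List String := ["Player", "Overall Rank"]

def Spec_choose_value_column (columns : List String) (out : String) : Prop := out = choose_value_column_alt columns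
instance (columns : List String) (out : String) : Decidable (Spec_choose_value_column columns out) := by unfold Spec_choose_value_column; infer_instance

-- ===== CLAIM (what is proved, stated in full; the proofs are below) =====
def Claim_equal_choose_value_column : Prop := ∀ (columns : List String), Dom_choose_value_column columns → Pre_choose_value_column columns → Spec_choose_value_column columns (choose_value_column columns)

-- ===== LEMMAS AND PROOFS =====

-- the four option predicates on a column
def pvP (k : Nat) (c : String) : Bool :=
  (pvOptions.getD k []).all (fun n => PySem.Str.isIn n (PySem.Str.lower c))

-- the priority chain as a pair (option index, column): common reference form for both ports
def pvChain (cs : List String) : Option (Int × String) :=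
  match cs.find? (pvP 0) with
  | some c => some (0, c)
  | none =>
    match cs.find? (pvP 1) with
    | some c => some (1, c)
    | none =>
      match cs.find? (pvP 2) with
      | some c => some (2, c)
      | none =>
        match cs.find? (pvP 3) with
        | some c => some (3, c)
        | none => none

-- ---- A side: the lowered dict scan is the first matching column ----

theorem pvFold_find (p : String → Bool) :
    ∀ (cs : List String) (d : PySem.Dict String String),
      d.keys.Nodup → (∀ q ∈ d.items, q.2 = PySem.Str.lower q.1) →
      ((cs.foldl (fun d c => d.insert c (PySem.Str.lower c)) d).items.find? (fun q => p q.2)) =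
        (d.items.find? (fun q => p q.2)).or
          ((cs.find? (fun c => p (PySem.Str.lower c))).map (fun c => (c, PySem.Str.lower c))) := by
  intro cs
  induction cs with
  | nil => intro d hnd hv; simp
  | cons c rest ih =>
    intro d hnd hv
    have hstep : (List.foldl (fun d c => d.insert c (PySem.Str.lower c)) d (c :: rest)) =
        (List.foldl (fun d c => d.insert c (PySem.Str.lower c)) (d.insert c (PySem.Str.lower c)) rest) := rfl
    rw [hstep, ih (d.insert c (PySem.Str.lower c)) (PySem.Dict.nodup_keys_insert d c _ hnd) ?hv']
    case hv' =>
      intro q hq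
      rcases (PySem.Dict.mem_items_insert d c _ q).1 hq with h | ⟨hq', _⟩
      · subst h; rfl
      · exact hv q hq'
    by_cases hc : d.contains c = true
    · -- overwrite: items unchanged (the stored value is already lower c)
      have hmem : (c, PySem.Str.lower c) ∈ d.items := by
        have hsome : (d.get? c).isSome := by rw [← PySem.Dict.contains_eq_isSome_get?]; exact hc
        rcases Option.isSome_iff_exists.1 hsome with ⟨v, hvv⟩
        have hm := PySem.Dict.mem_items_of_get?_eq_some d hvv
        have hv2 : v = PySem.Str.lower c := hv (c, v) hm
        rwa [hv2] at hm
      have hitems : (d.insert c (PySem.Str.lower c)).items = d.items := by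
        rw [PySem.Dict.items_insert_of_contains d _ hc]
        conv_rhs => rw [← List.map_id d.items]
        apply List.map_congr_left
        intro q hq
        by_cases hk : (q.1 == c) = true
        · have hk' : q.1 = c := by simpa using hk
          have : q.2 = PySem.Str.lower q.1 := hv q hq
          have hq2 : d.get? q.1 = some q.2 := PySem.Dict.get?_of_mem_items d (by simpa using hq) hnd
          have hqc : d.get? c = some (PySem.Str.lower c) := PySem.Dict.get?_of_mem_items d hmem hnd
          rw [hk'] at hq2
          have hqe : q.2 = PySem.Str.lower c := Option.some.inj (hq2.symm.trans hqc)
          simp [hk', Prod.ext_iff, hqe]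
        · simp [hk]
      rw [hitems]
      by_cases hp : p (PySem.Str.lower c) = true
      · -- d already contains a matching item: left find? is some
        have : (d.items.find? (fun q => p q.2)).isSome := by
          apply List.find?_isSome.2
          exact ⟨(c, PySem.Str.lower c), hmem, by simpa using hp⟩
        rcases Option.isSome_iff_exists.1 this with ⟨q, hq⟩
        simp [List.find?_cons, hp, hq]
      · simp [List.find?_cons, hp]
    · -- fresh key: items append
      have hc' : d.contains c = false := by simpa using hc
      rw [PySem.Dict.items_insert_of_not_contains d _ hc', List.find?_append]
      rcases hfd : d.items.find? (fun q => p q.2) with _ | q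
      · by_cases hp : p (PySem.Str.lower c) = true <;>
          simp [List.find?_cons, hp, hfd]
      · simp [hfd]

theorem pvFindColumn_eq (columns ns : List String) :
    pvFindColumn columns ns =
      columns.find? (fun c => ns.all (fun n => PySem.Str.isIn (PySem.Str.lower n) (PySem.Str.lower c))) := by
  unfold pvFindColumn
  rw [pvFold_find (fun low => ns.all (fun n => PySem.Str.isIn (PySem.Str.lower n) low)) columns
      PySem.Dict.empty (by simp [PySem.Dict.keys_empty]) (by simp [PySem.Dict.empty])]
  rcases h : columns.find? (fun c => ns.all fun n => PySem.Str.isIn (PySem.Str.lower n) (PySem.Str.lower c)) with _ | c <;>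
    simp [PySem.Dict.empty, h]

-- A's lowered needles are the literal needles
theorem pvA_pred0 : (fun c => (["rk"] : List String).all (fun n => PySem.Str.isIn (PySem.Str.lower n) (PySem.Str.lower c))) = pvP 0 := by
  funext c; simp [pvP, pvOptions, (by decide : PySem.Chars.lower ['r','k'] = ['r','k'])]
theorem pvA_pred1 : (fun c => (["rank"] : List String).all (fun n => PySem.Str.isIn (PySem.Str.lower n) (PySem.Str.lower c))) = pvP 1 := by
  funext c; simp [pvP, pvOptions, (by decide : PySem.Chars.lower ['r','a','n','k'] = ['r','a','n','k'])]
theorem pvA_pred2 : (fun c => (["ecr"] : List String).all (fun n => PySem.Str.isIn (PySem.Str.lower n) (PySem.Str.lower c))) = pvP 2 := by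
  funext c; simp [pvP, pvOptions, (by decide : PySem.Chars.lower ['e','c','r'] = ['e','c','r'])]
theorem pvA_pred3 : (fun c => (["overall", "rank"] : List String).all (fun n => PySem.Str.isIn (PySem.Str.lower n) (PySem.Str.lower c))) = pvP 3 := by
  funext c
  simp [pvP, pvOptions, (by decide : PySem.Chars.lower ['o','v','e','r','a','l','l'] = ['o','v','e','r','a','l','l']),
    (by decide : PySem.Chars.lower ['r','a','n','k'] = ['r','a','n','k'])]

theorem pvA_eq_chain (columns : List String) :
    choose_value_column columns = (match pvChain columns with | some (_, c) => c | none => "") := by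
  unfold choose_value_column pvChain
  rw [pvFindColumn_eq, pvFindColumn_eq, pvFindColumn_eq, pvFindColumn_eq,
    pvA_pred0, pvA_pred1, pvA_pred2, pvA_pred3]
  rcases h0 : columns.find? (pvP 0) with _ | c0 <;>
  rcases h1 : columns.find? (pvP 1) with _ | c1 <;>
  rcases h2 : columns.find? (pvP 2) with _ | c2 <;>
  rcases h3 : columns.find? (pvP 3) with _ | c3 <;> simp

-- ---- B side ----

-- the inner 'for i, needles in enumerate(options)' as an if-chain on the four predicates
theorem pvOptIdx_eq (c : String) :
    pvOptIdx (PySem.Str.lower c) =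
      (if pvP 0 c then some 0 else if pvP 1 c then some 1 else
       if pvP 2 c then some 2 else if pvP 3 c then some 3 else none) := by
  unfold pvOptIdx
  simp only [pvOptions, PySem.List.enumerate, pvP, List.getD]
  by_cases h0 : pvP 0 c = true <;> by_cases h1 : pvP 1 c = true <;>
    by_cases h2 : pvP 2 c = true <;> by_cases h3 : pvP 3 c = true <;>
    simp_all [pvP, pvOptions, PySem.List.enumerate, List.find?]

-- folding from an accumulator = combining the accumulator with the fold from none
theorem pvFold_acc :
    ∀ (cs : List String) (k : Int) (c : String),
      cs.foldl pvStep (some (k, c)) =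
        (match cs.foldl pvStep none with
         | none => some (k, c)
         | some (k', c') => if k' < k then some (k', c') else some (k, c)) := by
  intro cs
  induction cs with
  | nil => intro k c; simp
  | cons x rest ih =>
    intro k c
    simp only [List.foldl_cons, pvStep]
    rcases hg : pvOptIdx (PySem.Str.lower x) with _ | i
    · simp only []
      exact ih k c
    · simp only []
      rw [ih i x]
      by_cases hik : i < k
      · rw [if_pos hik, ih i x]
        rcases hN : rest.foldl pvStep none with _ | ⟨k', c'⟩
        · simp [hik]
        · by_cases h1 : k' < i
          · simp [h1, show k' < k by omega]
          · simp [h1, hik]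
      · rw [if_neg hik, ih k c]
        rcases hN : rest.foldl pvStep none with _ | ⟨k', c'⟩
        · simp [hik]
        · by_cases h1 : k' < i
          · by_cases h2 : k' < k
            · simp [h1, h2]
            · simp [h1, h2]
          · simp [h1, hik, show ¬ k' < k by omega]

-- the single pass computes the priority chain
theorem pvB_eq_chain : ∀ (cs : List String), cs.foldl pvStep none = pvChain cs := by
  intro cs
  induction cs with
  | nil => simp [pvChain]
  | cons c rest ih =>
    simp only [List.foldl_cons]
    by_cases h0 : pvP 0 c = true
    · have hs : pvStep none c = some (0, c) := by simp [pvStep, pvOptIdx_eq, h0]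
      rw [hs, pvFold_acc, ih]
      unfold pvChain
      rcases h0r : rest.find? (pvP 0) with _ | c0 <;>
      rcases h1r : rest.find? (pvP 1) with _ | c1 <;>
      rcases h2r : rest.find? (pvP 2) with _ | c2 <;>
      rcases h3r : rest.find? (pvP 3) with _ | c3 <;>
      simp [List.find?_cons, h0, h0r, h1r, h2r, h3r]
    · by_cases h1 : pvP 1 c = true
      · have hs : pvStep none c = some (1, c) := by simp [pvStep, pvOptIdx_eq, h0, h1]
        rw [hs, pvFold_acc, ih]
        unfold pvChain
        rcases h0r : rest.find? (pvP 0) with _ | c0 <;>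
        rcases h1r : rest.find? (pvP 1) with _ | c1 <;>
        rcases h2r : rest.find? (pvP 2) with _ | c2 <;>
        rcases h3r : rest.find? (pvP 3) with _ | c3 <;>
        simp [List.find?_cons, h0, h1, h0r, h1r, h2r, h3r]
      · by_cases h2 : pvP 2 c = true
        · have hs : pvStep none c = some (2, c) := by simp [pvStep, pvOptIdx_eq, h0, h1, h2]
          rw [hs, pvFold_acc, ih]
          unfold pvChain
          rcases h0r : rest.find? (pvP 0) with _ | c0 <;>
          rcases h1r : rest.find? (pvP 1) with _ | c1 <;>
          rcases h2r : rest.find? (pvP 2) with _ | c2 <;>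
          rcases h3r : rest.find? (pvP 3) with _ | c3 <;>
          simp [List.find?_cons, h0, h1, h2, h0r, h1r, h2r, h3r]
        · by_cases h3 : pvP 3 c = true
          · have hs : pvStep none c = some (3, c) := by simp [pvStep, pvOptIdx_eq, h0, h1, h2, h3]
            rw [hs, pvFold_acc, ih]
            unfold pvChain
            rcases h0r : rest.find? (pvP 0) with _ | c0 <;>
            rcases h1r : rest.find? (pvP 1) with _ | c1 <;>
            rcases h2r : rest.find? (pvP 2) with _ | c2 <;>
            rcases h3r : rest.find? (pvP 3) with _ | c3 <;>
            simp [List.find?_cons, h0, h1, h2, h3, h0r, h1r, h2r, h3r]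
          · have hs : pvStep none c = none := by simp [pvStep, pvOptIdx_eq, h0, h1, h2, h3]
            rw [hs, ih]
            unfold pvChain
            rw [List.find?_cons_of_neg (by simpa using h0), List.find?_cons_of_neg (by simpa using h1),
                List.find?_cons_of_neg (by simpa using h2), List.find?_cons_of_neg (by simpa using h3)]

-- ===== VERDICT (by name: the statement is the Claim_ definition above) =====
theorem choose_value_column_spec : Claim_equal_choose_value_column := by
  intro columns _ _
  unfold Spec_choose_value_column choose_value_column_alt
  rw [pvA_eq_chain, pvB_eq_chain]
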